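-- pv_equiv track=rewrite | github.com/sweetboymusik/QAP-4-Files-EB | Project 1 + 2/project_1_EB.py | check_postal_code
-- ===== SOURCE A (Python) =====
-- def check_postal_code(code):
--     correct = False
--
--     for i, char in enumerate(code):
--         if (i + 1) % 2 != 0:
--             if char.isalpha():
--                 correct = True
--             else:
--                 correct = False
--                 break
--         elif (i + 1) % 2 == 0:
--             if char.isdigit():
--                 correct = True
--             else:
--                 correct = False
--                 break
--
--     return correct
-- ===== SOURCE B (Python) =====
-- def check_postal_code(code):
--     if not code:
--         return False
--
--     def ok(s):
--         if not s:
--             return True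
--         if not s[0].isalpha():
--             return False
--         if len(s) == 1:
--             return True
--         if not s[1].isdigit():
--             return False
--         return ok(s[2:])
--
--     return ok(code)
-- ===== Notes on version B (the rewrite author's own statement) =====
-- stated objective: alternative
-- what changed: A's single indexed loop with a correct-flag and break over (i+1)%2 parity is replaced by a recursion that consumes the string two characters (letter, digit) at a time with no index or flag.
import Mathlib
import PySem

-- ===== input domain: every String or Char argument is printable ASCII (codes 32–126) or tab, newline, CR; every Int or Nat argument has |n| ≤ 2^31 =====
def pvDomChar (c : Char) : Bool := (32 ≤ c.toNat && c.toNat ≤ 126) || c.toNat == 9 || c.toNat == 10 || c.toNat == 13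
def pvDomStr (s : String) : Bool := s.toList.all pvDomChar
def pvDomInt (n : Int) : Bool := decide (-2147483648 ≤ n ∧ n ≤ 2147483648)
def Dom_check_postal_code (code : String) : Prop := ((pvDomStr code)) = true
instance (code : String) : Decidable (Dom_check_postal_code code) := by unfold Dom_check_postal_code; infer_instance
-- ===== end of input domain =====

-- B replaces A's index-parity loop with a correct-flag and break by a recursion eating (letter, digit) pairs; objective: alternative decomposition, same cost.

-- ===== PORT A =====
-- the for-loop over enumerate(code) with the `correct` flag; `break` is an early `false` return
def pvGoA : List Char → Nat → Bool → Bool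
  | [], _, correct => correct
  | c :: rest, i, _ =>
    if (i + 1) % 2 ≠ 0 then
      if PySem.Chars.isalpha c then pvGoA rest (i + 1) true else false
    else
      if PySem.Chars.isdigit c then pvGoA rest (i + 1) true else false

def check_postal_code (code : String) : Bool := pvGoA code.toList 0 false

-- ===== PORT B =====
-- the inner `ok(s)` of Source B: letter, then digit, then recurse on s[2:]
def pvOkB : List Char → Bool
  | [] => true
  | c :: rest =>
    if ¬ PySem.Chars.isalpha c then false
    else match rest with
      | [] => true
      | d :: rest2 => if ¬ PySem.Chars.isdigit d then false else pvOkB rest2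

def check_postal_code_alt (code : String) : Bool :=
  if code.toList = [] then false else pvOkB code.toList

-- ===== PRECONDITION & SPEC =====
def Spec_check_postal_code (code : String) (out : Bool) : Prop := out = check_postal_code_alt code
instance (code : String) (out : Bool) : Decidable (Spec_check_postal_code code out) := by unfold Spec_check_postal_code; infer_instance

-- ===== CLAIM (what is proved, stated in full; the proofs are below) =====
def Claim_equal_check_postal_code : Prop := ∀ (code : String), Dom_check_postal_code code → Spec_check_postal_code code (check_postal_code code)

-- ===== LEMMAS AND PROOFS =====
-- digit-first variant of pvOkB, used to state the odd-index invariant of A's loop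
def pvOkOdd : List Char → Bool
  | [] => true
  | d :: rest2 => if ¬ PySem.Chars.isdigit d then false else pvOkB rest2

lemma pvGoA_parity : ∀ (l : List Char),
    (∀ (k : Nat) (c : Bool), pvGoA l (2 * k) c = if l = [] then c else pvOkB l) ∧
    (∀ (k : Nat) (c : Bool), pvGoA l (2 * k + 1) c = if l = [] then c else pvOkOdd l) := by
  intro l
  induction l with
  | nil => simp [pvGoA]
  | cons a t ih =>
    constructor
    · intro k c
      have h1 : (2 * k + 1) % 2 ≠ 0 := by omega
      by_cases ha : PySem.Chars.isalpha a
      · rw [show pvGoA (a :: t) (2 * k) c = pvGoA t (2 * k + 1) true from by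
              simp [pvGoA, ha],
            ih.2 k true]
        cases t <;> simp [pvOkB, pvOkOdd, ha]
      · cases t <;> simp [pvGoA, pvOkB, ha]
    · intro k c
      have h1 : (2 * k + 1 + 1) % 2 = 0 := by omega
      have h2 : 2 * k + 1 + 1 = 2 * (k + 1) := by omega
      by_cases hd : PySem.Chars.isdigit a
      · rw [show pvGoA (a :: t) (2 * k + 1) c = pvGoA t (2 * (k + 1)) true from by
              simp [pvGoA, hd, h2],
            ih.1 (k + 1) true]
        cases t <;> simp [pvOkB, pvOkOdd, hd]
      · cases t <;> simp [pvGoA, pvOkOdd, pvOkB, h1, hd]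

-- ===== VERDICT (by name: the statement is the Claim_ definition above) =====
theorem check_postal_code_spec : Claim_equal_check_postal_code := by
  intro code _
  unfold Spec_check_postal_code check_postal_code check_postal_code_alt
  have := (pvGoA_parity code.toList).1 0 false
  simpa using this
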